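-- pv_equiv track=rewrite | github.com/bruno20614/Faculdade | Análise de Algoritmos/Algoritmos Gulosos/Instâncias especiais do problema da mochila/q1.py | disquete_problem
-- ===== SOURCE A (Python) =====
-- from operator import itemgetter
--
-- def disquete_problem(tam_arquivo,C):
--     arquivos_ordernados = sorted(enumerate(tam_arquivo),key=itemgetter(1), reverse=True)
--     k = []
--     soma = 0
--
--     for idx, tamanho in arquivos_ordernados:
--         if soma + tamanho <= C:
--             k.append(idx)
--             soma += tamanho
--         else:
--             break
--     return k
-- ===== SOURCE B (Python) =====
-- from operator import itemgetter
--
-- def disquete_problem(tam_arquivo, C):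
--     # Selection instead of sorting: repeatedly extract the first largest
--     # remaining file; stop as soon as the chosen one no longer fits.
--     rest = list(enumerate(tam_arquivo))
--     chosen = []
--     cap = C
--     while rest:
--         i, t = max(rest, key=itemgetter(1))
--         if t > cap:
--             break
--         chosen.append(i)
--         cap -= t
--         rest.remove((i, t))
--     return chosen
-- ===== Notes on version B (the rewrite author's own statement) =====
-- stated objective: alternative
-- what changed: Replaces sort-then-greedy-scan by selection without any sort: repeatedly take the first maximum of the remaining pairs (max with key), stop as soon as it no longer fits the remaining capacity, and remove it from the work list.
import Mathlib
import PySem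

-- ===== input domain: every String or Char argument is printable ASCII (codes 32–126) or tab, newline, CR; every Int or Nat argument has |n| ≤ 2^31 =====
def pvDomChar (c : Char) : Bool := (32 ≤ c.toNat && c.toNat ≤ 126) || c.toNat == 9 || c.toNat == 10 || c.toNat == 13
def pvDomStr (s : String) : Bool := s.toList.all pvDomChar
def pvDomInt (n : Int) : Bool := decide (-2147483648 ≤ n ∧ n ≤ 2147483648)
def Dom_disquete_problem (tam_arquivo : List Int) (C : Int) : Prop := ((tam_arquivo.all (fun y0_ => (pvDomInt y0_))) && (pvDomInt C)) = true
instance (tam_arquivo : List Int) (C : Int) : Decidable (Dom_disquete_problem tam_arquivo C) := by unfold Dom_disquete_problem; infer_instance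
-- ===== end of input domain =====

-- B replaces sort-then-scan by repeated extraction of the first maximum (selection, no sort); objective: alternative. Return-value equivalence only (B consumes its own work list, not the argument).


-- ===== PORT A =====
-- A's for-loop over the sorted pairs with running sum 'soma' and break
def dpLoopA (C : Int) : List (Int × Int) → Int → List Int
  | [], _ => []
  | (idx, tamanho) :: rest, soma =>
    if soma + tamanho ≤ C then idx :: dpLoopA C rest (soma + tamanho) else []

def disquete_problem (tam_arquivo : List Int) (C : Int) : List Int :=
  dpLoopA C (PySem.List.sorted (PySem.List.enumerate tam_arquivo) (fun p => p.2) true) 0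

-- ===== PORT B =====
-- B's while-loop: max(rest, key=itemgetter(1)) then rest.remove(...); fuel = |rest|
-- (each pass removes exactly one element, so |rest| passes exhaust the list — same iterations as the Python while)
def dpSelLoop : Nat → List (Int × Int) → Int → List Int
  | 0, _, _ => []
  | fuel + 1, rest, cap =>
    match PySem.List.max? rest (fun p => p.2) with
    | none => []
    | some (i, t) =>
      if t > cap then []
      else i :: dpSelLoop fuel ((PySem.List.remove? rest (i, t)).getD []) (cap - t)

def disquete_problem_alt (tam_arquivo : List Int) (C : Int) : List Int :=
  let rest := PySem.List.enumerate tam_arquivo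
  dpSelLoop rest.length rest C

-- ===== PRECONDITION & SPEC =====
def Spec_disquete_problem (tam_arquivo : List Int) (C : Int) (out : List Int) : Prop := out = disquete_problem_alt tam_arquivo C
instance (tam_arquivo : List Int) (C : Int) (out : List Int) : Decidable (Spec_disquete_problem tam_arquivo C out) := by unfold Spec_disquete_problem; infer_instance

-- ===== CLAIM (what is proved, stated in full; the proofs are below) =====
def Claim_equal_disquete_problem : Prop := ∀ (tam_arquivo : List Int) (C : Int), Dom_disquete_problem tam_arquivo C → Spec_disquete_problem tam_arquivo C (disquete_problem tam_arquivo C)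

-- ===== LEMMAS AND PROOFS =====

-- appending one element to the input appends one insertion step
theorem sorted_rev_snoc (xs : List (Int × Int)) (x : Int × Int) :
    PySem.List.sorted (xs ++ [x]) (fun p => p.2) true =
      PySem.List.insertBy (fun a b => decide (b.2 < a.2)) x
        (PySem.List.sorted xs (fun p => p.2) true) := by
  rw [PySem.List.sorted_rev_eq_foldl_insertBy, PySem.List.sorted_rev_eq_foldl_insertBy,
    List.foldl_append]
  rfl

-- Python max over xs ++ [x]: the old first maximum survives unless x strictly beats it
theorem max?_snoc (xs : List (Int × Int)) (x : Int × Int) :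
    PySem.List.max? (xs ++ [x]) (fun p => p.2) =
      match PySem.List.max? xs (fun p => p.2) with
      | none => some x
      | some m => if m.2 < x.2 then some x else some m := by
  cases hm : PySem.List.max? xs (fun p => p.2) with
  | none =>
    obtain rfl : xs = [] := (PySem.List.max?_eq_none_iff _ _).mp hm
    rfl
  | some m =>
    simp only [PySem.List.max?] at hm ⊢
    rw [List.foldl_append, hm]
    rfl

-- the selection step: stable descending sort = first maximum :: sort of the rest
theorem sorted_rev_sel (l : List (Int × Int)) (m : Int × Int)
    (h : PySem.List.max? l (fun p => p.2) = some m) :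
    PySem.List.sorted l (fun p => p.2) true =
      m :: PySem.List.sorted (l.erase m) (fun p => p.2) true := by
  induction l using List.reverseRecOn with
  | nil => simp [PySem.List.max?] at h
  | append_singleton xs x ih =>
    rw [max?_snoc] at h
    rw [sorted_rev_snoc]
    cases hm : PySem.List.max? xs (fun p => p.2) with
    | none =>
      obtain rfl : xs = [] := (PySem.List.max?_eq_none_iff _ _).mp hm
      rw [hm] at h
      obtain rfl : x = m := by simpa using h
      simp [PySem.List.sorted, PySem.List.insertBy]
    | some m0 =>
      rw [hm] at h
      by_cases hc : m0.2 < x.2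
      · obtain rfl : x = m := by simpa [hc] using h
        have hnot : x ∉ xs := fun hx =>
          absurd (PySem.List.max?_isMax hm x hx) (by omega)
        rw [List.erase_append_right _ hnot]
        simp only [List.erase_cons_head, List.append_nil]
        cases hs : PySem.List.sorted xs (fun p => p.2) true with
        | nil => simp [PySem.List.insertBy]
        | cons y t =>
          have hy : y ∈ xs := (PySem.List.mem_sorted xs _ true y).mp (hs ▸ List.mem_cons_self)
          have : y.2 < x.2 := lt_of_le_of_lt (PySem.List.max?_isMax hm y hy) hc
          rw [PySem.List.insertBy.eq_2]
          simp [this]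
      · obtain rfl : m0 = m := by simpa [hc] using h
        have hmem : m0 ∈ xs := PySem.List.max?_mem hm
        rw [ih hm, PySem.List.insertBy.eq_2, List.erase_append_left _ hmem,
          sorted_rev_snoc]
        simp [hc]

-- the two loops agree: A over the sorted list with running sum, B by repeated extraction
theorem loop_eq : ∀ (n : Nat) (rest : List (Int × Int)), rest.length = n →
    ∀ (C soma : Int),
      dpLoopA C (PySem.List.sorted rest (fun p => p.2) true) soma =
        dpSelLoop n rest (C - soma) := by
  intro n
  induction n with
  | zero =>
    intro rest hlen C soma
    obtain rfl : rest = [] := List.length_eq_zero_iff.mp hlen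
    rfl
  | succ n ih =>
    intro rest hlen C soma
    cases hm : PySem.List.max? rest (fun p => p.2) with
    | none =>
      obtain rfl : rest = [] := (PySem.List.max?_eq_none_iff _ _).mp hm
      simp at hlen
    | some m =>
      obtain ⟨i, t⟩ := m
      have hmem : (i, t) ∈ rest := PySem.List.max?_mem hm
      have hrem : PySem.List.remove? rest (i, t) = some (rest.erase (i, t)) :=
        PySem.List.remove?_eq_some_erase rest (i, t) hmem
      have hlen' : (rest.erase (i, t)).length = n := by
        rw [List.length_erase_of_mem hmem, hlen]
        omega
      rw [sorted_rev_sel rest (i, t) hm]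
      simp only [dpLoopA, dpSelLoop, hm, hrem, Option.getD_some]
      by_cases hfit : soma + t ≤ C
      · rw [if_pos hfit, if_neg (by omega : ¬ t > C - soma),
          ih (rest.erase (i, t)) hlen' C (soma + t)]
        congr 1
        ring_nf
      · rw [if_neg hfit, if_pos (by omega : t > C - soma)]

-- ===== VERDICT (by name: the statement is the Claim_ definition above) =====
theorem disquete_problem_spec : Claim_equal_disquete_problem := by
  intro tam C _
  unfold Spec_disquete_problem disquete_problem disquete_problem_alt
  simpa using loop_eq (PySem.List.enumerate tam).length (PySem.List.enumerate tam) rfl C 0
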